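-- pv_equiv track=rewrite | github.com/ancoleman/qdrant-rag-mcp | src/github_integration/issue_analyzer.py | _estimate_priority
-- ===== SOURCE A (Python) =====
-- from typing import Dict, List, Optional, Any, Tuple
--
-- def _estimate_priority(issue: Dict[str, Any]) -> str:
--     """Estimate issue priority based on labels and content."""
--     labels = [label.lower() for label in issue.get("labels", [])]
--
--     if any(label in ["critical", "urgent", "blocker", "p0"] for label in labels):
--         return "critical"
--     elif any(label in ["high", "important", "p1"] for label in labels):
--         return "high"
--     elif any(label in ["low", "minor", "p3"] for label in labels):
--         return "low"
--     else:
--         return "medium"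
-- ===== SOURCE B (Python) =====
-- _RANK = {"critical": 0, "urgent": 0, "blocker": 0, "p0": 0,
--          "high": 1, "important": 1, "p1": 1,
--          "low": 3, "minor": 3, "p3": 3}
--
-- _NAME = {0: "critical", 1: "high", 3: "low"}
--
--
-- def _estimate_priority(issue):
--     """Estimate issue priority based on labels and content."""
--     best = None
--     for label in issue.get("labels", []):
--         r = _RANK.get(label.lower())
--         if r is not None and (best is None or r < best):
--             best = r
--     return _NAME.get(best, "medium")
-- ===== Notes on version B (the rewrite author's own statement) =====
-- stated objective: idiomatic
-- what changed: Replaces the three ordered any()-scans over the lowered labels with a single pass that looks each label up in a keyword-to-rank table and keeps the minimum rank, rendered to a name at the end.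
import Mathlib
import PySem

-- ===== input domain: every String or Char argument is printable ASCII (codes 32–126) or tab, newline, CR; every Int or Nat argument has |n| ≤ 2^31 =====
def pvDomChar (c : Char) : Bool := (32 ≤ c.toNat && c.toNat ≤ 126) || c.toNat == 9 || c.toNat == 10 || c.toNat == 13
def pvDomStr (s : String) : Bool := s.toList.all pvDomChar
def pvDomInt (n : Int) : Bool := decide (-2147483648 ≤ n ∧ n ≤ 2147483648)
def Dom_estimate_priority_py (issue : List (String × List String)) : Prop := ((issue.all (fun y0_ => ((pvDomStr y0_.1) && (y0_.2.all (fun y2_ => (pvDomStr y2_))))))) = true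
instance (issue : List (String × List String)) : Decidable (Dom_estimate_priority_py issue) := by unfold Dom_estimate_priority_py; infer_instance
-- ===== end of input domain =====

-- B changes A's three ordered any()-scans into one table-lookup pass tracking the minimum rank (idiomatic; same cost class).

-- ===== PORT A =====
def estimate_priority_py (issue : List (String × List String)) : String :=
  let labels := ((PySem.Dict.mk issue).getD "labels" []).map PySem.Str.lower
  if labels.any (fun l => (["critical", "urgent", "blocker", "p0"] : List String).contains l) then "critical"
  else if labels.any (fun l => (["high", "important", "p1"] : List String).contains l) then "high"
  else if labels.any (fun l => (["low", "minor", "p3"] : List String).contains l) then "low"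
  else "medium"

-- ===== PORT B =====
-- the module-level _RANK dict literal (distinct keys)
def pvRank : PySem.Dict String Nat :=
  PySem.Dict.mk [("critical", 0), ("urgent", 0), ("blocker", 0), ("p0", 0),
                 ("high", 1), ("important", 1), ("p1", 1),
                 ("low", 3), ("minor", 3), ("p3", 3)]

-- the loop body: r = _RANK.get(label.lower()); if r is not None and (best is None or r < best): best = r
def pvStep (best : Option Nat) (label : String) : Option Nat :=
  match pvRank.get? (PySem.Str.lower label) with
  | none => best
  | some r =>
    match best with
    | none => some r
    | some b => if r < b then some r else best

def estimate_priority_py_alt (issue : List (String × List String)) : String :=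
  let best := ((PySem.Dict.mk issue).getD "labels" []).foldl pvStep none
  -- _NAME.get(best, "medium")
  match best with
  | some 0 => "critical"
  | some 1 => "high"
  | some 3 => "low"
  | _ => "medium"

-- ===== PRECONDITION & SPEC =====
def Spec_estimate_priority_py (issue : List (String × List String)) (out : String) : Prop := out = estimate_priority_py_alt issue
instance (issue : List (String × List String)) (out : String) : Decidable (Spec_estimate_priority_py issue out) := by unfold Spec_estimate_priority_py; infer_instance

-- ===== CLAIM (what is proved, stated in full; the proofs are below) =====
def Claim_equal_estimate_priority_py : Prop := ∀ (issue : List (String × List String)), Dom_estimate_priority_py issue → Spec_estimate_priority_py issue (estimate_priority_py issue)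

-- ===== LEMMAS AND PROOFS =====

-- left-biased minimum on Option Nat; pvStep is pvOmin of the table lookup
def pvOmin : Option Nat → Option Nat → Option Nat
  | a, none => a
  | none, some r => some r
  | some b, some r => if r < b then some r else some b

lemma pvStep_eq_omin (best : Option Nat) (label : String) :
    pvStep best label = pvOmin best (pvRank.get? (PySem.Str.lower label)) := by
  unfold pvStep pvOmin
  rcases pvRank.get? (PySem.Str.lower label) with _ | r <;> rcases best with _ | b <;> simp

lemma pvOmin_none_left (b : Option Nat) : pvOmin none b = b := by
  rcases b <;> rfl

lemma pvOmin_assoc (a b c : Option Nat) :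
    pvOmin (pvOmin a b) c = pvOmin a (pvOmin b c) := by
  rcases a with _ | a <;> rcases b with _ | b <;> rcases c with _ | c <;>
    simp only [pvOmin] <;> (try split_ifs) <;> (try simp_all) <;>
    (try split_ifs) <;> (try simp_all) <;> omega

lemma pvFoldl_general (L : List String) (acc : Option Nat) :
    L.foldl pvStep acc = pvOmin acc (L.foldl pvStep none) := by
  induction L generalizing acc with
  | nil => rfl
  | cons x xs ih =>
    simp only [List.foldl_cons]
    rw [ih (pvStep acc x), ih (pvStep none x), pvStep_eq_omin, pvStep_eq_omin,
        pvOmin_none_left, pvOmin_assoc]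

-- closed form of the table lookup as a first-match chain
def pvRank3 (s : String) : Option Nat :=
  if (["critical", "urgent", "blocker", "p0"] : List String).contains s then some 0
  else if (["high", "important", "p1"] : List String).contains s then some 1
  else if (["low", "minor", "p3"] : List String).contains s then some 3
  else none

lemma pvRank_eq (s : String) : pvRank.get? s = pvRank3 s := by
  simp only [pvRank, pvRank3, PySem.Dict.get?_mk_cons, List.contains_cons,
    List.contains_nil, Bool.or_false, beq_iff_eq]
  split_ifs <;> (try rfl) <;> simp_all <;> simp_all [eq_comm]

def pvB0 (L : List String) : Bool := L.any (fun l => (["critical", "urgent", "blocker", "p0"] : List String).contains l)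
def pvB1 (L : List String) : Bool := L.any (fun l => (["high", "important", "p1"] : List String).contains l)
def pvB3 (L : List String) : Bool := L.any (fun l => (["low", "minor", "p3"] : List String).contains l)

lemma pvCons_case (c0 c1 c3 b0 b1 b3 : Bool) :
    pvOmin (if c0 then some 0 else if c1 then some 1 else if c3 then some 3 else none)
           (if b0 then some 0 else if b1 then some 1 else if b3 then some 3 else none) =
      (if (c0 || b0) then some 0 else if (c1 || b1) then some 1
       else if (c3 || b3) then some 3 else none) := by
  cases c0 <;> cases c1 <;> cases c3 <;> cases b0 <;> cases b1 <;> cases b3 <;> rfl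

lemma pvG_spec (L : List String) :
    L.foldl pvStep none =
      if pvB0 (L.map PySem.Str.lower) then some 0
      else if pvB1 (L.map PySem.Str.lower) then some 1
      else if pvB3 (L.map PySem.Str.lower) then some 3
      else none := by
  induction L with
  | nil => rfl
  | cons x xs ih =>
    rw [List.foldl_cons, pvFoldl_general, ih, pvStep_eq_omin, pvOmin_none_left, pvRank_eq]
    simp only [List.map_cons, pvB0, pvB1, pvB3, List.any_cons, pvRank3]
    exact pvCons_case _ _ _ _ _ _

lemma pvRender_if (b0 b1 b3 : Bool) :
    (if b0 then "critical" else if b1 then "high" else if b3 then "low" else "medium") =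
      (match (if b0 then some 0 else if b1 then some 1 else if b3 then some 3 else none :
          Option Nat) with
       | some 0 => "critical"
       | some 1 => "high"
       | some 3 => "low"
       | _ => "medium") := by
  cases b0 <;> cases b1 <;> cases b3 <;> rfl

-- ===== VERDICT (by name: the statement is the Claim_ definition above) =====
theorem estimate_priority_py_spec : Claim_equal_estimate_priority_py := by
  intro issue _
  unfold Spec_estimate_priority_py estimate_priority_py estimate_priority_py_alt
  rw [pvG_spec]
  simp only [pvB0, pvB1, pvB3]
  exact pvRender_if _ _ _
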